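-- pv_equiv track=rewrite | github.com/MarritS/smart_bike_jetson_nano | helper_functions.py | filter_not_detected
-- ===== SOURCE A (Python) =====
-- def filter_not_detected(tracked, detected):
--     deleteindexes = []
--     for key, car in tracked.items():
--         if car not in detected:
--             deleteindexes.append(key)
--
--     for key in deleteindexes:
--         tracked.pop(key)
--     return tracked
-- ===== SOURCE B (Python) =====
-- def filter_not_detected(tracked, detected):
--     removed = True
--     while removed:
--         removed = False
--         for key, car in tracked.items():
--             if car not in detected:
--                 del tracked[key]
--                 removed = True
--                 break
--     return tracked
-- ===== Notes on version B (the rewrite author's own statement) =====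
-- stated objective: alternative
-- what changed: A marks all doomed keys in one pass and then pops them in a second sweep; B is a fixpoint loop that rescans the dict, deletes the first entry whose value is not detected, and restarts until a full scan deletes nothing, so it never mutates the dict it is iterating over and needs no key buffer.
import Mathlib
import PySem

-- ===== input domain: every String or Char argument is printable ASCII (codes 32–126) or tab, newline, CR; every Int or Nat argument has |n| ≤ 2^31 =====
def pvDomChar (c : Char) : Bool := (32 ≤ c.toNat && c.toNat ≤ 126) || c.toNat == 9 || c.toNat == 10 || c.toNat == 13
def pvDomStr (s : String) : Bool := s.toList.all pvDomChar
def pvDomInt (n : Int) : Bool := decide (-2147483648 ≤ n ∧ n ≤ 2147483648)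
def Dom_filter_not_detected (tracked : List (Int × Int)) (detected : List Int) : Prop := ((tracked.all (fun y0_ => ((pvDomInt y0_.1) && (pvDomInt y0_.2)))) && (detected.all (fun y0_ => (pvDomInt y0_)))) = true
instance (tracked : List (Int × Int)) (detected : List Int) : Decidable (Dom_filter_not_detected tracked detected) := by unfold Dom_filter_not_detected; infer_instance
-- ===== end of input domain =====

-- B replaces A's mark-doomed-keys-then-pop sweep by a fixpoint loop: rescan the dict,
-- delete the first entry whose value is not detected, restart until a scan deletes nothing.
-- Both Pythons mutate the dict in place; the equivalence proved is about the returned value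
-- (which is that same dict in both).

-- ===== PORT A =====
def filter_not_detected (tracked : List (Int × Int)) (detected : List Int) : List (Int × Int) :=
  -- deleteindexes = []; for key, car in tracked.items(): if car not in detected: deleteindexes.append(key)
  let deleteindexes : List Int :=
    tracked.foldl (fun acc kv => if !(detected.contains kv.2) then acc ++ [kv.1] else acc) []
  -- for key in deleteindexes: tracked.pop(key)   (key is always present; value unused)
  (deleteindexes.foldl (fun d k => d.erase k) (PySem.Dict.mk tracked)).items

-- ===== PORT B =====
-- 'while removed: … for key, car in tracked.items(): if car not in detected: del tracked[key]; break'
-- = find the first offending entry, delete its key, restart; stop when none is found.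
def fnAltLoop (detected : List Int) (L : List (Int × Int)) : List (Int × Int) :=
  match h : L.find? (fun p => !(detected.contains p.2)) with
  | none => L
  | some p => fnAltLoop detected (L.filter (fun q => !(q.1 == p.1)))
termination_by L.length
decreasing_by
  have hp := List.mem_of_find?_eq_some h
  have h1 : (L.attach.filter (fun x => !(x.1.1 == p.1))).length < L.attach.length :=
    List.length_filter_lt_length_iff_exists.mpr ⟨⟨p, hp⟩, List.mem_attach _ _, by simp⟩
  simpa using h1

def filter_not_detected_alt (tracked : List (Int × Int)) (detected : List Int) : List (Int × Int) :=
  fnAltLoop detected tracked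

-- ===== PRECONDITION & SPEC =====
-- Pre_ restricts tracked to association lists with pairwise-distinct keys: those are exactly
-- the faithful images of Python dicts under the type convention; a duplicate-key list denotes
-- no dict (dict construction collapses it before either Python function ever runs).
def Pre_filter_not_detected (tracked : List (Int × Int)) (detected : List Int) : Prop :=
  (tracked.map Prod.fst).Nodup
instance (tracked : List (Int × Int)) (detected : List Int) : Decidable (Pre_filter_not_detected tracked detected) := by unfold Pre_filter_not_detected; infer_instance

def pvWitness_filter_not_detected : (List (Int × Int)) × List Int := ([(1, 5), (2, 7)], [5])

def Spec_filter_not_detected (tracked : List (Int × Int)) (detected : List Int) (out : List (Int × Int)) : Prop := out = filter_not_detected_alt tracked detected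
instance (tracked : List (Int × Int)) (detected : List Int) (out : List (Int × Int)) : Decidable (Spec_filter_not_detected tracked detected out) := by unfold Spec_filter_not_detected; infer_instance

-- ===== CLAIM (what is proved, stated in full; the proofs are below) =====
def Claim_equal_filter_not_detected : Prop := ∀ (tracked : List (Int × Int)) (detected : List Int), Dom_filter_not_detected tracked detected → Pre_filter_not_detected tracked detected → Spec_filter_not_detected tracked detected (filter_not_detected tracked detected)

-- ===== LEMMAS AND PROOFS =====

-- A side: folding erase over a key list filters out every item whose key occurs in it.
lemma erase_foldl_items (ks : List Int) (L : List (Int × Int)) :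
    (ks.foldl (fun d k => d.erase k) (PySem.Dict.mk L)).items
      = L.filter (fun p => !(ks.contains p.1)) := by
  induction ks generalizing L with
  | nil => simp
  | cons k ks ih =>
    have herase : (PySem.Dict.mk L).erase k
        = PySem.Dict.mk (L.filter (fun p => !(p.1 == k))) := rfl
    simp only [List.foldl_cons, herase, ih, List.filter_filter]
    apply List.filter_congr
    intro p _
    simp only [List.contains_cons, Bool.not_or]
    cases h1 : (p.1 == k) <;> cases h2 : ks.contains p.1 <;> rfl

-- B side: on nodup-key lists the fixpoint-deletion loop computes the positive filter.
lemma fnAltLoop_eq_filter (detected : List Int) (L : List (Int × Int))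
    (hnd : (L.map Prod.fst).Nodup) :
    fnAltLoop detected L = L.filter (fun p => detected.contains p.2) := by
  induction hlen : L.length using Nat.strong_induction_on generalizing L with
  | _ n ih =>
    subst hlen
    rw [fnAltLoop.eq_def]
    cases hfind : L.find? (fun p => !(detected.contains p.2)) with
    | none =>
      simp only
      symm
      apply List.filter_eq_self.mpr
      intro p hp
      have := List.find?_eq_none.mp hfind p hp
      simpa using this
    | some p =>
      simp only
      have hp := List.mem_of_find?_eq_some hfind
      have hpred : (!(detected.contains p.2)) = true :=
        List.find?_some (p := fun q : Int × Int => !(detected.contains q.2)) hfind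
      have hlt : (L.filter (fun q => !(q.1 == p.1))).length < L.length :=
        List.length_filter_lt_length_iff_exists.mpr ⟨p, hp, by simp⟩
      have hnd' : ((L.filter (fun q => !(q.1 == p.1))).map Prod.fst).Nodup :=
        List.Nodup.sublist (List.Sublist.map Prod.fst List.filter_sublist) hnd
      rw [ih _ hlt _ hnd' rfl, List.filter_filter]
      apply List.filter_congr
      intro q hq
      cases hkeep : detected.contains q.2 with
      | true =>
        -- a kept entry cannot have p's key: keys are nodup, and p is not kept
        have hne : (q.1 == p.1) = false := by
          rcases Bool.eq_false_or_eq_true (q.1 == p.1) with h | h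
          · exfalso
            have hinj := List.inj_on_of_nodup_map (f := Prod.fst) hnd
            have hqp : q = p := hinj hq hp (by simpa using h)
            rw [hqp] at hkeep
            rw [hkeep] at hpred
            simp at hpred
          · exact h
        simp [hne]
      | false => simp

-- ===== VERDICT (by name: the statement is the Claim_ definition above) =====
theorem filter_not_detected_spec : Claim_equal_filter_not_detected := by
  intro tracked detected _ hpre
  unfold Spec_filter_not_detected filter_not_detected filter_not_detected_alt
  have hinj := List.inj_on_of_nodup_map (f := Prod.fst) hpre
  -- A side: the first loop collects the keys of the non-kept items
  rw [PySem.List.foldl_append_if (fun kv => !(detected.contains kv.2)) Prod.fst tracked [],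
      List.nil_append, erase_foldl_items, fnAltLoop_eq_filter _ _ hpre]
  -- the two filters agree on every member of tracked
  apply List.filter_congr
  intro p hp
  cases hq : detected.contains p.2 with
  | true =>
    simp only [List.contains_eq_mem] at hq
    simp [List.contains_eq_mem]
    intro x hx
    have heq : (p.1, x) = p := hinj hx hp rfl
    rw [show x = p.2 from congrArg Prod.snd heq]
    exact of_decide_eq_true hq
  | false =>
    simp only [List.contains_eq_mem] at hq
    simp [List.contains_eq_mem]
    exact ⟨p.2, by rw [Prod.mk.eta]; exact hp, of_decide_eq_false hq⟩
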